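-- pv_equiv track=rewrite | github.com/nguyennhusonars/ultralytics | ultralytics/nn/modules/SPANet.py | get_patch_dims_hw_for_stages
-- ===== SOURCE A (Python) =====
-- def get_patch_dims_hw_for_stages(img_size_wh, initial_stride, stage_strides):
--     if isinstance(img_size_wh, int):
--         img_w, img_h = img_size_wh, img_size_wh # Assuming square if int
--     else: # tuple (W,H) or (H,W) - consistent with timm (H,W)
--         img_h, img_w = img_size_wh[0], img_size_wh[1]
--
--
--     patch_dims_list = []
--     # After initial patch embed
--     current_h, current_w = img_h // initial_stride, img_w // initial_stride
--     patch_dims_list.append((current_h, current_w))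
--
--     # For subsequent stages after downsampling
--     for s_stride in stage_strides:
--         current_h //= s_stride
--         current_w //= s_stride
--         patch_dims_list.append((current_h, current_w))
--     return patch_dims_list
-- ===== SOURCE B (Python) =====
-- def get_patch_dims_hw_for_stages(img_size_wh, initial_stride, stage_strides):
--     if isinstance(img_size_wh, int):
--         img_h = img_w = img_size_wh
--     else:
--         img_h, img_w = img_size_wh[0], img_size_wh[1]
--
--     # Pass 1: cumulative stride products (total downsampling factor per stage).
--     prods = []
--     prod = 1
--     for s in (initial_stride, *stage_strides):
--         prod *= s
--         prods.append(prod)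
--
--     # Pass 2: divide the ORIGINAL dims by each accumulated factor.
--     return [(img_h // p, img_w // p) for p in prods]
-- ===== Notes on version B (the rewrite author's own statement) =====
-- stated objective: alternative
-- what changed: Instead of threading a running quotient through repeated floor divisions, B first builds the list of cumulative stride products and then divides the original img_h/img_w by each product; Pre_ requires a nonzero initial stride (zero raises ZeroDivisionError in both) and positive stage strides, since a negative stage stride is outside the natural domain and there floor division no longer composes with the product.
-- outside the precondition, e.g. on get_patch_dims_hw_for_stages((7, 7), 1, [-2, -2]): A returns [(7, 7), (-4, -4), (2, 2)], B returns [(7, 7), (-4, -4), (1, 1)]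
import Mathlib
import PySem

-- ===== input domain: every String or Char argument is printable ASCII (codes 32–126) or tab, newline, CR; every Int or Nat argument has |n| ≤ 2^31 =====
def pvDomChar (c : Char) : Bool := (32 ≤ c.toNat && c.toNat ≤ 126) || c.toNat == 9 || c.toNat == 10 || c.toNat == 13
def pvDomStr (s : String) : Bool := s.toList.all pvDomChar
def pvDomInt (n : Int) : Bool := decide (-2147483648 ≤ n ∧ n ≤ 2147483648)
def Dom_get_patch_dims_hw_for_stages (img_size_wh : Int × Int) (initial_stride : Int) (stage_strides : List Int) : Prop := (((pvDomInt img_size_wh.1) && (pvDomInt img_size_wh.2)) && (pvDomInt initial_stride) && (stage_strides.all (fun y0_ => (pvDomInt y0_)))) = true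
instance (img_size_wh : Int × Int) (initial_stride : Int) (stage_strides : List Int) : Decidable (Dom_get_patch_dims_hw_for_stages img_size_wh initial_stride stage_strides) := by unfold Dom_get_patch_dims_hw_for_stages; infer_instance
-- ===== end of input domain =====

-- B replaces A's running-quotient loop by a different algorithm: build the cumulative
-- stride products first, then divide the ORIGINAL dims by each product (objective: alternative).

-- ===== PORT A =====
-- Under the type convention img_size_wh is always a pair, so A's isinstance(int) branch
-- is unreachable; the tuple branch reads (H, W) = (img_size_wh[0], img_size_wh[1]).
def get_patch_dims_hw_for_stages (img_size_wh : Int × Int) (initial_stride : Int) (stage_strides : List Int) : List (Int × Int) :=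
  let img_h := img_size_wh.1
  let img_w := img_size_wh.2
  let current_h := PySem.Int.floordiv img_h initial_stride
  let current_w := PySem.Int.floordiv img_w initial_stride
  let patch_dims_list : List (Int × Int) := [(current_h, current_w)]
  let st := stage_strides.foldl
    (fun (st : Int × Int × List (Int × Int)) s_stride =>
      let h := PySem.Int.floordiv st.1 s_stride
      let w := PySem.Int.floordiv st.2.1 s_stride
      (h, w, st.2.2 ++ [(h, w)]))
    (current_h, current_w, patch_dims_list)
  st.2.2

-- ===== PORT B =====
-- Source B: pass 1 builds the cumulative products of (initial_stride, *stage_strides) into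
-- `prods`; pass 2 is the comprehension dividing img_h/img_w by each product.
def get_patch_dims_hw_for_stages_alt (img_size_wh : Int × Int) (initial_stride : Int) (stage_strides : List Int) : List (Int × Int) :=
  let img_h := img_size_wh.1
  let img_w := img_size_wh.2
  let prods := ((initial_stride :: stage_strides).foldl
      (fun (st : Int × List Int) s => (st.1 * s, st.2 ++ [st.1 * s]))
      (1, [])).2
  prods.map (fun p => (PySem.Int.floordiv img_h p, PySem.Int.floordiv img_w p))

-- ===== PRECONDITION & SPEC =====
-- Pre_ requires a nonzero initial stride (at zero both A and B raise ZeroDivisionError)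
-- and POSITIVE stage strides: a non-positive stage stride is outside the task's natural
-- domain (zero raises in both; for a negative one floor division no longer composes with
-- the stride product, so A and B legitimately differ on that nonsensical corner).
def Pre_get_patch_dims_hw_for_stages (img_size_wh : Int × Int) (initial_stride : Int) (stage_strides : List Int) : Prop :=
  initial_stride ≠ 0 ∧ ∀ s ∈ stage_strides, 0 < s
instance (img_size_wh : Int × Int) (initial_stride : Int) (stage_strides : List Int) : Decidable (Pre_get_patch_dims_hw_for_stages img_size_wh initial_stride stage_strides) := by unfold Pre_get_patch_dims_hw_for_stages; infer_instance
def pvWitness_get_patch_dims_hw_for_stages : (Int × Int) × Int × List Int := ((224, 224), 4, [2, 2, 2])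

def Spec_get_patch_dims_hw_for_stages (img_size_wh : Int × Int) (initial_stride : Int) (stage_strides : List Int) (out : List (Int × Int)) : Prop := out = get_patch_dims_hw_for_stages_alt img_size_wh initial_stride stage_strides
instance (img_size_wh : Int × Int) (initial_stride : Int) (stage_strides : List Int) (out : List (Int × Int)) : Decidable (Spec_get_patch_dims_hw_for_stages img_size_wh initial_stride stage_strides out) := by unfold Spec_get_patch_dims_hw_for_stages; infer_instance

-- ===== CLAIM =====
def Claim_equal_get_patch_dims_hw_for_stages : Prop := ∀ (img_size_wh : Int × Int) (initial_stride : Int) (stage_strides : List Int), Dom_get_patch_dims_hw_for_stages img_size_wh initial_stride stage_strides → Pre_get_patch_dims_hw_for_stages img_size_wh initial_stride stage_strides → Spec_get_patch_dims_hw_for_stages img_size_wh initial_stride stage_strides (get_patch_dims_hw_for_stages img_size_wh initial_stride stage_strides)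

-- ===== LEMMAS AND PROOFS =====
-- Reference list of cumulative products starting from p.
def pvProds (p : Int) : List Int → List Int
  | [] => []
  | s :: rest => (p * s) :: pvProds (p * s) rest

theorem pvFoldB_eq_prods (ss : List Int) (p : Int) (acc : List Int) :
    (ss.foldl (fun (st : Int × List Int) s => (st.1 * s, st.2 ++ [st.1 * s])) (p, acc)).2
      = acc ++ pvProds p ss := by
  induction ss generalizing p acc with
  | nil => simp [pvProds]
  | cons s rest ih => simp [pvProds, ih]

theorem pvFd_fd_pos (n p s : Int) (hp : 0 < p) (hs : 0 < s) :
    PySem.Int.floordiv (PySem.Int.floordiv n p) s = PySem.Int.floordiv n (p * s) := by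
  rw [PySem.Int.floordiv_eq_ediv_of_pos hp, PySem.Int.floordiv_eq_ediv_of_pos hs,
    PySem.Int.floordiv_eq_ediv_of_pos (mul_pos hp hs), Int.ediv_ediv_of_nonneg hp.le]

-- floor(floor(n/p)/s) = floor(n/(p*s)) for any p ≠ 0 once s > 0.
theorem pvFd_fd (n p s : Int) (hp : p ≠ 0) (hs : 0 < s) :
    PySem.Int.floordiv (PySem.Int.floordiv n p) s = PySem.Int.floordiv n (p * s) := by
  rcases lt_or_gt_of_ne hp with hneg | hpos
  · have h1 : PySem.Int.floordiv n p = PySem.Int.floordiv (-n) (-p) := by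
      rw [PySem.Int.floordiv_neg_neg]
    rw [h1, pvFd_fd_pos (-n) (-p) s (by omega) hs]
    have h2 : -p * s = -(p * s) := by ring
    rw [h2, PySem.Int.floordiv_neg_neg]
  · exact pvFd_fd_pos n p s hpos hs

theorem pvFoldA_eq_map_prods (H W : Int) (ss : List Int) (hss : ∀ s ∈ ss, 0 < s)
    (p : Int) (hp : p ≠ 0) (acc : List (Int × Int)) :
    (ss.foldl
      (fun (st : Int × Int × List (Int × Int)) s =>
        let h := PySem.Int.floordiv st.1 s
        let w := PySem.Int.floordiv st.2.1 s
        (h, w, st.2.2 ++ [(h, w)]))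
      (PySem.Int.floordiv H p, PySem.Int.floordiv W p, acc)).2.2
      = acc ++ (pvProds p ss).map (fun q => (PySem.Int.floordiv H q, PySem.Int.floordiv W q)) := by
  induction ss generalizing p acc with
  | nil => simp [pvProds]
  | cons s rest ih =>
    have hs : 0 < s := hss s (by simp)
    have hrest : ∀ t ∈ rest, 0 < t := fun t ht => hss t (by simp [ht])
    simp only [List.foldl_cons, pvProds, List.map_cons]
    rw [pvFd_fd H p s hp hs, pvFd_fd W p s hp hs,
      ih hrest (p * s) (mul_ne_zero hp hs.ne') (acc ++ [(PySem.Int.floordiv H (p * s), PySem.Int.floordiv W (p * s))])]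
    simp

-- ===== VERDICT =====
theorem get_patch_dims_hw_for_stages_spec : Claim_equal_get_patch_dims_hw_for_stages := by
  intro img s0 ss _ hpre
  obtain ⟨hs0, hss⟩ := hpre
  unfold Spec_get_patch_dims_hw_for_stages get_patch_dims_hw_for_stages get_patch_dims_hw_for_stages_alt
  simp only [List.foldl_cons]
  rw [pvFoldB_eq_prods ss (1 * s0) ([] ++ [1 * s0])]
  rw [pvFoldA_eq_map_prods img.1 img.2 ss hss s0 hs0]
  simp
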